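-- pv_equiv track=rewrite | github.com/tani-s/337-project-2 | helper.py | get_POS_after_prefix
-- ===== SOURCE A (Python) =====
-- def get_POS_after_prefix(paragraph, phrases, POS, ignore=False):
--     post = set()
--     for p in phrases:
--         for i in range(len(paragraph)):
--             (word_i, pos_i) = paragraph[i]
--             if p[0] == word_i:
--                 match = True
--                 L = len(p)
--                 if i+L < len(paragraph):
--                     for k in range(1,L):
--                         #w1 = p[k]
--                         (word_ik, pos_ik) = paragraph[i+k]
--                         if p[k] != word_ik:
--                             match = False
--                             break
--                     if match:
--                         for j in range(i+L,len(paragraph)):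
--                             (word_j, pos_j) = paragraph[j]
--                             if not ignore:
--                                 if pos_j in POS:
--                                     post.add(word_j)
--                                     break
--                             else:
--                                 if pos_j in POS:
--                                     1+1
--                                 else:
--                                     post.add(word_j)
--                                     break
--     return post
-- ===== SOURCE B (Python) =====
-- def get_POS_after_prefix(paragraph, phrases, POS, ignore=False):
--     n = len(paragraph)
--     POSset = set(POS)
--     # nxt[j] = first accepted word at index >= j, or None:
--     # the first word at index >= j whose (pos in POS) membership differs from `ignore`.
--     nxt = [None] * (n + 1)
--     for j in range(n - 1, -1, -1):
--         w, pos = paragraph[j]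
--         nxt[j] = w if ((pos in POSset) != ignore) else nxt[j + 1]
--     words = [w for (w, _) in paragraph]
--     post = set()
--     for p in phrases:
--         L = len(p)
--         for i in range(n - L):  # exactly the starts with i + L < n
--             if words[i:i+L] == p and nxt[i+L] is not None:
--                 post.add(nxt[i+L])
--     return post
-- ===== Notes on version B (the rewrite author's own statement) =====
-- stated objective: alternative
-- what changed: B precomputes, in one backward pass, the next accepted word after each position (replacing A's per-match forward scan) and finds phrase occurrences by slice comparison over exactly the valid start positions, instead of A's triple-nested scan with per-index guards; it trades A's repeated forward scans for a one-pass table.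
-- outside the precondition, e.g. on get_POS_after_prefix([('a', 'N')], [[]], {'N'}, False): A raises IndexError, B returns {'a'}
import Mathlib
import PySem

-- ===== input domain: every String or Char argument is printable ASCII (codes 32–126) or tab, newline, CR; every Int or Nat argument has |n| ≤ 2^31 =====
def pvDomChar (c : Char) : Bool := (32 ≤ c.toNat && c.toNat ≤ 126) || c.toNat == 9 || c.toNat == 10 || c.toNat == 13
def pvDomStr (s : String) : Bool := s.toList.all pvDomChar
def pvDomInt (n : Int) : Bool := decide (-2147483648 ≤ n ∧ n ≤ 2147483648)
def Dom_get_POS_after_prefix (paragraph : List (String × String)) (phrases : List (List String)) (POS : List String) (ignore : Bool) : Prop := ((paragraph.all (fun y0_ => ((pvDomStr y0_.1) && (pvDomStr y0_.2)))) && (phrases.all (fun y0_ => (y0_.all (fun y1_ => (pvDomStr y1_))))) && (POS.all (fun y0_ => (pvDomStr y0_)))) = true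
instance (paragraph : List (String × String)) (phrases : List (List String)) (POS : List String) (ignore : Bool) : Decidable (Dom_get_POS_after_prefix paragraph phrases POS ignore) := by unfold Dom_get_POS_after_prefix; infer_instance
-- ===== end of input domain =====

-- B replaces A's per-match forward scan by a precomputed next-accepted-word table and
-- matches phrases by slice comparison over exactly the valid start positions (alternative algorithm).

-- ===== PORT A =====
-- A's innermost j-loop: scan forward from index j, add the first accepted word, break.
-- (pyGet? …).getD: the index is always in range at every call site A reaches.
def aScan (paragraph : List (String × String)) (POS : List String) (ignore : Bool) (post : PySem.Set String) : List Int → PySem.Set String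
  | [] => post
  | j :: js =>
    let wp := (PySem.List.pyGet? paragraph j).getD ("", "")
    if ignore = false then
      if POS.contains wp.2 then PySem.Set.add post wp.1
      else aScan paragraph POS ignore post js
    else
      if POS.contains wp.2 then aScan paragraph POS ignore post js
      else PySem.Set.add post wp.1

-- A's k-loop: check p[k] == paragraph[i+k][0] for k in range(1, L), breaking on mismatch.
def aMatchK (paragraph : List (String × String)) (p : List String) (i : Int) : List Int → Bool
  | [] => true
  | k :: ks =>
    let wp := (PySem.List.pyGet? paragraph (i + k)).getD ("", "")
    if ((PySem.List.pyGet? p k).getD "") ≠ wp.1 then false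
    else aMatchK paragraph p i ks

-- A's body for one start index i of one phrase p.
def aBodyI (paragraph : List (String × String)) (POS : List String) (ignore : Bool) (p : List String) (post : PySem.Set String) (i : Int) : PySem.Set String :=
  let word_i := ((PySem.List.pyGet? paragraph i).getD ("", "")).1
  if (PySem.List.pyGet? p 0).getD "" = word_i then
    let L : Int := (p.length : Int)
    if i + L < (paragraph.length : Int) then
      if aMatchK paragraph p i (PySem.List.pyRange 1 L 1) = true then
        aScan paragraph POS ignore post (PySem.List.pyRange (i + L) (paragraph.length : Int) 1)
      else post
    else post
  else post

def get_POS_after_prefix (paragraph : List (String × String)) (phrases : List (List String)) (POS : List String) (ignore : Bool) : List String :=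
  phrases.foldl
    (fun post p => (PySem.List.pyRange 0 (paragraph.length : Int) 1).foldl (aBodyI paragraph POS ignore p) post)
    PySem.Set.empty

-- ===== PORT B =====
-- nxt[j] for j = 0..n (built back to front in Source B): first word at index ≥ j whose
-- POS-membership differs from `ignore`, else None.
def bNxt (POS : List String) (ignore : Bool) : List (String × String) → List (Option String)
  | [] => [none]
  | wp :: rest =>
    let r := bNxt POS ignore rest
    (if (POS.contains wp.2) != ignore then some wp.1 else r.headD none) :: r

-- B's body for one start index i of one phrase p.
def bBody (words : List String) (nxt : List (Option String)) (p : List String) (post : PySem.Set String) (i : Int) : PySem.Set String :=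
  if PySem.List.slice words (some i) (some (i + (p.length : Int))) = p then
    match (PySem.List.pyGet? nxt (i + (p.length : Int))).getD none with
    | some w => PySem.Set.add post w
    | none => post
  else post

def get_POS_after_prefix_alt (paragraph : List (String × String)) (phrases : List (List String)) (POS : List String) (ignore : Bool) : List String :=
  let nxt := bNxt POS ignore paragraph
  let words := paragraph.map Prod.fst
  phrases.foldl
    (fun post p => (PySem.List.pyRange 0 ((paragraph.length : Int) - (p.length : Int)) 1).foldl (bBody words nxt p) post)
    PySem.Set.empty

-- ===== PRECONDITION & SPEC =====
-- Pre_ excludes exactly the inputs where A raises IndexError: a nonempty paragraph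
-- together with an empty phrase (A evaluates p[0]).
def Pre_get_POS_after_prefix (paragraph : List (String × String)) (phrases : List (List String)) (POS : List String) (ignore : Bool) : Prop :=
  paragraph = [] ∨ ∀ p ∈ phrases, p ≠ []
instance (paragraph : List (String × String)) (phrases : List (List String)) (POS : List String) (ignore : Bool) : Decidable (Pre_get_POS_after_prefix paragraph phrases POS ignore) := by unfold Pre_get_POS_after_prefix; infer_instance

def pvWitness_get_POS_after_prefix : (List (String × String)) × List (List String) × List String × Bool :=
  ([("the", "DT"), ("cat", "NN")], [[("the" : String)]], [("NN" : String)], false)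

def Spec_get_POS_after_prefix (paragraph : List (String × String)) (phrases : List (List String)) (POS : List String) (ignore : Bool) (out : List String) : Prop := out = get_POS_after_prefix_alt paragraph phrases POS ignore
instance (paragraph : List (String × String)) (phrases : List (List String)) (POS : List String) (ignore : Bool) (out : List String) : Decidable (Spec_get_POS_after_prefix paragraph phrases POS ignore out) := by unfold Spec_get_POS_after_prefix; infer_instance

-- ===== CLAIM (what is proved, stated in full; the proofs are below) =====
def Claim_equal_get_POS_after_prefix : Prop := ∀ (paragraph : List (String × String)) (phrases : List (List String)) (POS : List String) (ignore : Bool), Dom_get_POS_after_prefix paragraph phrases POS ignore → Pre_get_POS_after_prefix paragraph phrases POS ignore → Spec_get_POS_after_prefix paragraph phrases POS ignore (get_POS_after_prefix paragraph phrases POS ignore)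

-- ===== LEMMAS AND PROOFS =====

-- Specification of B's nxt table: the first accepted entry of a suffix.
def pickNext (POS : List String) (ignore : Bool) : List (String × String) → Option String
  | [] => none
  | wp :: rest => if (POS.contains wp.2) != ignore then some wp.1 else pickNext POS ignore rest

lemma bNxt_get? (POS : List String) (ignore : Bool) (l : List (String × String)) (j : Nat) (h : j ≤ l.length) :
    (bNxt POS ignore l)[j]? = some (pickNext POS ignore (l.drop j)) := by
  induction l generalizing j with
  | nil =>
    have : j = 0 := by simpa using h
    subst this; simp [bNxt, pickNext]
  | cons wp rest ih =>
    cases j with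
    | zero =>
      have h0 := ih 0 (by omega)
      simp only [List.drop_zero] at h0
      have hh : (bNxt POS ignore rest).head?.getD none = pickNext POS ignore rest := by
        rw [List.head?_eq_getElem?, h0]; rfl
      simp only [bNxt, List.getElem?_cons_zero, List.drop_zero, pickNext,
        List.headD_eq_head?_getD, hh]
    | succ j =>
      simp only [bNxt, List.getElem?_cons_succ, List.drop_succ_cons]
      exact ih j (by simpa using h)

lemma aScan_eq (POS : List String) (ignore : Bool) (suf pre : List (String × String)) (post : PySem.Set String) :
    aScan (pre ++ suf) POS ignore post (PySem.List.pyRange (pre.length : Int) ((pre ++ suf).length : Int) 1)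
      = (match pickNext POS ignore suf with
         | some w => PySem.Set.add post w
         | none => post) := by
  induction suf generalizing pre with
  | nil =>
    rw [List.append_nil, PySem.List.pyRange_one_eq_nil (le_refl _)]
    simp [aScan, pickNext]
  | cons wp rest ih =>
    have key := ih (pre ++ [wp])
    rw [show (pre ++ [wp]) ++ rest = pre ++ wp :: rest from by simp] at key
    rw [show ((pre ++ [wp]).length : Int) = (pre.length : Int) + 1 from by simp] at key
    have hlt : (pre.length : Int) < ((pre ++ wp :: rest).length : Int) := by
      push_cast [List.length_append, List.length_cons]; omega
    rw [PySem.List.pyRange_one_cons hlt]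
    simp only [aScan, PySem.List.pyGet?_append_length, Option.getD_some]
    rw [show ((pre ++ wp :: rest).length : Int) = (pre.length : Int) + ((rest.length : Int) + 1)
      from by push_cast [List.length_append, List.length_cons]; omega] at key
    cases ignore <;> by_cases hc : wp.2 ∈ POS <;>
      simp [hc, key, pickNext]

lemma aMatchK_eq (paragraph : List (String × String)) (p : List String) (a : Nat)
    (hn : a + p.length ≤ paragraph.length) :
    ∀ (d s : Nat), s + d = p.length →
    ((aMatchK paragraph p (a : Int) (PySem.List.pyRange (s : Int) (p.length : Int) 1) = true)
      ↔ ((paragraph.map Prod.fst).drop (a + s)).take (p.length - s) = p.drop s) := by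
  intro d
  induction d with
  | zero =>
    intro s hs
    have hsL : s = p.length := by omega
    subst hsL
    rw [PySem.List.pyRange_one_eq_nil (le_refl _)]
    simp [aMatchK, List.drop_length]
  | succ d ihd =>
    intro s hs
    have hslt : s < p.length := by omega
    have hsn : a + s < paragraph.length := by omega
    rw [PySem.List.pyRange_one_cons (by exact_mod_cast hslt)]
    simp only [aMatchK]
    have hps : PySem.List.pyGet? p ((s : Nat) : Int) = some p[s] := by
      rw [PySem.List.pyGet?_natCast, List.getElem?_eq_getElem hslt]
    have hpar : PySem.List.pyGet? paragraph ((a : Int) + (s : Int)) = some paragraph[a + s] := by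
      rw [show (a : Int) + (s : Int) = ((a + s : Nat) : Int) from by push_cast; ring,
        PySem.List.pyGet?_natCast, List.getElem?_eq_getElem hsn]
    have hws : (paragraph.map Prod.fst).drop (a + s)
        = (paragraph[a + s]).1 :: (paragraph.map Prod.fst).drop (a + s + 1) := by
      rw [List.drop_eq_getElem_cons (by simpa using hsn)]
      simp
    have hpd : p.drop s = p[s] :: p.drop (s + 1) := List.drop_eq_getElem_cons hslt
    have htk : p.length - s = (p.length - (s + 1)) + 1 := by omega
    rw [hws, hpd, htk, List.take_succ_cons]
    have ihd' := ihd (s + 1) (by omega)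
    rw [show ((s : Int) + 1) = (((s + 1 : Nat)) : Int) from by push_cast; ring]
    by_cases heq : p[s] = (paragraph[a + s]).1
    · simp only [hps, hpar, Option.getD_some]
      rw [if_neg (by simp [heq]), ihd']
      constructor
      · intro hh; rw [List.cons_eq_cons]; exact ⟨heq.symm, hh⟩
      · intro hh; exact (List.cons_eq_cons.mp hh).2
    · simp only [hps, hpar, Option.getD_some]
      rw [if_pos heq]
      simp only [Bool.false_eq_true, false_iff]
      intro hh
      exact heq ((List.cons_eq_cons.mp hh).1).symm

lemma body_eq (paragraph : List (String × String)) (POS : List String) (ignore : Bool)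
    (p : List String) (hp : p ≠ []) (i : Int)
    (hi : 0 ≤ i) (hiu : i + (p.length : Int) < (paragraph.length : Int)) (post : PySem.Set String) :
    aBodyI paragraph POS ignore p post i
      = bBody (paragraph.map Prod.fst) (bNxt POS ignore paragraph) p post i := by
  obtain ⟨a, rfl⟩ : ∃ a : Nat, i = (a : Int) := ⟨i.toNat, (Int.toNat_of_nonneg hi).symm⟩
  have haL : a + p.length < paragraph.length := by exact_mod_cast (by push_cast; omega : ((a + p.length : Nat) : Int) < (paragraph.length : Int))
  have hIL : (a : Int) + (p.length : Int) = ((a + p.length : Nat) : Int) := by push_cast; ring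
  obtain ⟨ph, pt, rfl⟩ : ∃ ph pt, p = ph :: pt := by
    cases p with
    | nil => exact absurd rfl hp
    | cons ph pt => exact ⟨ph, pt, rfl⟩
  have ha : a < paragraph.length := by omega
  have hpar : PySem.List.pyGet? paragraph (a : Int) = some paragraph[a] := by
    rw [PySem.List.pyGet?_natCast, List.getElem?_eq_getElem ha]
  -- the scan from a+L equals the pickNext of the suffix
  have hscan : ∀ q : PySem.Set String,
      aScan paragraph POS ignore q (PySem.List.pyRange (((a + (ph :: pt).length : Nat)) : Int) ((paragraph.length : Int)) 1)
        = (match pickNext POS ignore (paragraph.drop (a + (ph :: pt).length)) with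
           | some w => PySem.Set.add q w
           | none => q) := by
    intro q
    have hs := aScan_eq POS ignore (paragraph.drop (a + (ph :: pt).length)) (paragraph.take (a + (ph :: pt).length)) q
    rw [List.take_append_drop] at hs
    rw [show (((paragraph.take (a + (ph :: pt).length)).length : Nat) : Int) = (((a + (ph :: pt).length : Nat)) : Int) from by
      rw [List.length_take]; push_cast; omega] at hs
    exact hs
  -- the nxt-table entry at a+L is the pickNext of the suffix
  have hnxt : (PySem.List.pyGet? (bNxt POS ignore paragraph) ((a : Int) + ((ph :: pt).length : Int))).getD none
      = pickNext POS ignore (paragraph.drop (a + (ph :: pt).length)) := by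
    rw [hIL, PySem.List.pyGet?_natCast, bNxt_get? POS ignore paragraph _ (by omega)]
    rfl
  -- the prefix test of A equals B's slice comparison
  have hslice : PySem.List.slice (paragraph.map Prod.fst) (some (a : Int)) (some ((a : Int) + ((ph :: pt).length : Int)))
      = ((paragraph.map Prod.fst).drop a).take (ph :: pt).length := by
    exact PySem.List.slice_natCast_add _ _ _
  have hdropa : (paragraph.map Prod.fst).drop a = (paragraph[a]).1 :: (paragraph.map Prod.fst).drop (a + 1) := by
    rw [List.drop_eq_getElem_cons (by simpa using ha)]; simp
  have hmk := aMatchK_eq paragraph (ph :: pt) a (by omega) pt.length 1 (by rw [List.length_cons]; omega)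
  push_cast at hmk
  have hfull : (ph = (paragraph[a]).1 ∧ aMatchK paragraph (ph :: pt) (a : Int) (PySem.List.pyRange 1 ((ph :: pt).length : Int) 1) = true)
      ↔ ((paragraph.map Prod.fst).drop a).take (ph :: pt).length = ph :: pt := by
    rw [hmk]
    simp only [List.length_cons, Nat.add_sub_cancel]
    rw [hdropa, List.take_succ_cons]
    simp only [List.drop_one, List.tail_cons, List.cons_eq_cons]
    constructor
    · rintro ⟨h1, h2⟩; exact ⟨h1.symm, by simpa using h2⟩
    · rintro ⟨h1, h2⟩; exact ⟨h1.symm, by simpa using h2⟩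
  unfold aBodyI bBody
  dsimp only
  rw [hpar, hslice, hnxt]
  simp only [Option.getD_some, PySem.List.pyGet?_zero_cons]
  rw [if_pos hiu]
  by_cases hm : ((paragraph.map Prod.fst).drop a).take (ph :: pt).length = ph :: pt
  · obtain ⟨h1, h2⟩ := hfull.mpr hm
    rw [if_pos h1, if_pos h2, if_pos hm, hIL, hscan]
  · rw [if_neg hm]
    by_cases h1 : ph = (paragraph[a]).1
    · have h2 : ¬ aMatchK paragraph (ph :: pt) (a : Int) (PySem.List.pyRange 1 ((ph :: pt).length : Int) 1) = true := by
        intro h2; exact hm (hfull.mp ⟨h1, h2⟩)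
      rw [if_pos h1, if_neg h2]
    · rw [if_neg h1]

lemma aBodyI_noop (paragraph : List (String × String)) (POS : List String) (ignore : Bool)
    (p : List String) (post : PySem.Set String) (i : Int)
    (h : ¬ (i + (p.length : Int) < (paragraph.length : Int))) :
    aBodyI paragraph POS ignore p post i = post := by
  unfold aBodyI
  dsimp only
  split_ifs with h1 h2 <;> simp_all

lemma phrase_eq (paragraph : List (String × String)) (POS : List String) (ignore : Bool)
    (p : List String) (hp : paragraph = [] ∨ p ≠ []) (post : PySem.Set String) :
    (PySem.List.pyRange 0 (paragraph.length : Int) 1).foldl (aBodyI paragraph POS ignore p) post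
      = (PySem.List.pyRange 0 ((paragraph.length : Int) - (p.length : Int)) 1).foldl
          (bBody (paragraph.map Prod.fst) (bNxt POS ignore paragraph) p) post := by
  rcases hp with hnil | hp
  · subst hnil
    rw [show ((([] : List (String × String)).length : Int)) = (0 : Int) from rfl]
    rw [PySem.List.pyRange_one_eq_nil (le_refl _), PySem.List.pyRange_one_eq_nil (by push_cast; omega)]
    rfl
  · by_cases hbig : (paragraph.length : Int) - (p.length : Int) ≤ 0
    · rw [PySem.List.pyRange_one_eq_nil hbig, List.foldl_nil]
      rw [PySem.List.foldl_congr_mem _ (aBodyI paragraph POS ignore p) (fun q (_ : Int) => q) post ?_]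
      · exact List.foldl_fixed _
      · intro acc x hx
        have hxm := (PySem.List.mem_pyRange_one).mp hx
        exact aBodyI_noop paragraph POS ignore p acc x (by omega)
    · push_neg at hbig
      rw [PySem.List.pyRange_one_append 0 ((paragraph.length : Int) - (p.length : Int)) (paragraph.length : Int) (by omega) (by omega)]
      rw [List.foldl_append]
      rw [PySem.List.foldl_congr_mem _ (aBodyI paragraph POS ignore p) (fun q (_ : Int) => q) _ ?_]
      · rw [List.foldl_fixed]
        refine PySem.List.foldl_congr_mem _ _ _ _ ?_
        intro acc x hx
        have hxm := (PySem.List.mem_pyRange_one).mp hx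
        have hplen : p.length ≥ 1 := by cases p with | nil => exact absurd rfl hp | cons a b => simp
        exact body_eq paragraph POS ignore p hp x (by omega) (by omega) acc
      · intro acc x hx
        have hxm := (PySem.List.mem_pyRange_one).mp hx
        exact aBodyI_noop paragraph POS ignore p acc x (by omega)

-- ===== VERDICT (by name: the statement is the Claim_ definition above) =====
theorem get_POS_after_prefix_spec : Claim_equal_get_POS_after_prefix := by
  intro paragraph phrases POS ignore _ hpre
  unfold Spec_get_POS_after_prefix get_POS_after_prefix get_POS_after_prefix_alt
  dsimp only
  refine PySem.List.foldl_congr_mem _ _ _ _ ?_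
  intro post p hpmem
  refine phrase_eq paragraph POS ignore p ?_ post
  rcases hpre with h | h
  · exact Or.inl h
  · exact Or.inr (h p hpmem)
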